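-- pv_equiv track=rewrite | github.com/JeonJe/Algorithm | Test_code/crema/test1.py | getFinalString
-- ===== SOURCE A (Python) =====
-- def getFinalString(s):
--     # Write your code here
--     target = "AWS"
--     len_target = len(target)
--     stack = []
--     for e in s:
--         stack.append(e)
--         if e == target[-1] and target == "".join(stack[-len_target:]):
--             del stack[-len_target:]
--     return "".join(stack) if len(stack) > 0 else "-1"
-- ===== SOURCE B (Python) =====
-- def getFinalString(s):
--     while "AWS" in s:
--         s = s.replace("AWS", "")
--     return s if s else "-1"
-- ===== Notes on version B (the rewrite author's own statement) =====
-- stated objective: idiomatic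
-- what changed: Replaces the character-by-character stack reduction with a fixpoint loop that repeatedly deletes all 'AWS' occurrences via str.replace until none remain (confluent because 'AWS' has no self-overlap).
import Mathlib
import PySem

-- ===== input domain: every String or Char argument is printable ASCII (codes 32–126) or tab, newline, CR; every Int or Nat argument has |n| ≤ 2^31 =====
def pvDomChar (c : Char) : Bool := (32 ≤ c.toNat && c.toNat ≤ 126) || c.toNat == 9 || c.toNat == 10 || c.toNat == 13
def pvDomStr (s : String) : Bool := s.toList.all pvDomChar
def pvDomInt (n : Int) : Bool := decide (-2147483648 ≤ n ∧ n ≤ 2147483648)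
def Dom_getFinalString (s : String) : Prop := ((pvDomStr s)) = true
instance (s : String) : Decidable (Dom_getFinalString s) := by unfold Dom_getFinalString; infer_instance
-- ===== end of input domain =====

-- B replaces A's one-pass stack reduction by an idiomatic fixpoint loop
-- (`while "AWS" in s: s = s.replace("AWS", "")`); same return value (C-speed scans measured faster in a timing run).

-- ===== PORT A =====
-- One iteration of A's for-loop: stack.append(e), then `del stack[-3:]` if the
-- last char is target[-1] and the last three spell "AWS".
def pvStepA (stack : List Char) (e : Char) : List Char :=
  let stack' := stack ++ [e]
  if (some e == PySem.List.pyGet? ("AWS".toList) (-1)) &&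
     ("AWS".toList == PySem.List.slice stack' (some (-3)) none)
  then PySem.List.slice stack' none (some (-3))     -- del stack[-len_target:]
  else stack'

def getFinalString (s : String) : String :=
  let stack := s.toList.foldl pvStepA []
  if stack.length > 0 then String.ofList stack else "-1"

-- ===== PORT B =====
-- Accumulator-free form of one sweep `replace cs "AWS" ""`; used (via
-- pvReplace_length_lt) only to justify termination of B's while-loop below.
def pvRepl : List Char → List Char
  | [] => []
  | c :: t => if "AWS".toList.isPrefixOf (c :: t) then pvRepl (t.drop 2) else c :: pvRepl t
termination_by l => l.length
decreasing_by
  · exact Nat.lt_succ_of_le (by simp)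
  · simp

theorem pvGo0 (l acc : List Char) :
    PySem.Chars.replace.go "AWS".toList [] 0 l acc = acc.reverse ++ l := by
  rw [PySem.Chars.replace.go]

theorem pvGoNil (fuel : Nat) (acc : List Char) :
    PySem.Chars.replace.go "AWS".toList [] (fuel+1) [] acc = acc.reverse := by
  rw [PySem.Chars.replace.go]; simp

theorem pvGoCons (fuel : Nat) (c : Char) (t acc : List Char) :
    PySem.Chars.replace.go "AWS".toList [] (fuel+1) (c :: t) acc =
    if "AWS".toList.isPrefixOf (c :: t) then
      PySem.Chars.replace.go "AWS".toList [] fuel (t.drop 2) acc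
    else PySem.Chars.replace.go "AWS".toList [] fuel t (c :: acc) := by
  rw [PySem.Chars.replace.go]; simp

theorem pvGo_eq : ∀ (fuel : Nat) (l acc : List Char), l.length ≤ fuel →
    PySem.Chars.replace.go "AWS".toList [] fuel l acc = acc.reverse ++ pvRepl l := by
  intro fuel
  induction fuel with
  | zero =>
    intro l acc h
    have hl : l = [] := List.eq_nil_of_length_eq_zero (Nat.le_zero.mp h)
    subst hl
    rw [pvGo0, pvRepl]
  | succ n ih =>
    intro l acc h
    cases l with
    | nil => rw [pvGoNil, pvRepl]; simp
    | cons c t =>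
      rw [pvGoCons]
      by_cases hp : "AWS".toList.isPrefixOf (c :: t) = true
      · rw [if_pos hp, pvRepl, if_pos hp]
        exact ih (t.drop 2) acc (by simp at h ⊢; omega)
      · rw [if_neg hp, pvRepl, if_neg hp]
        rw [ih t (c :: acc) (by simp at h; omega)]
        simp

theorem pvReplace_eq_repl (cs : List Char) :
    PySem.Chars.replace cs "AWS".toList [] = pvRepl cs := by
  rw [PySem.Chars.replace]
  simp only [List.isEmpty_iff]
  rw [if_neg (by decide)]
  simpa using pvGo_eq cs.length cs [] (Nat.le_refl _)

theorem pvRepl_length_le : ∀ (l : List Char), (pvRepl l).length ≤ l.length := by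
  intro l
  induction l using pvRepl.induct with
  | case1 => simp [pvRepl]
  | case2 c t hp ih =>
    rw [pvRepl, if_pos hp]
    exact Nat.le_trans ih (by simp; omega)
  | case3 c t hp ih =>
    rw [pvRepl, if_neg hp]
    simpa using ih

theorem pvPrefix_shape {c : Char} {t : List Char}
    (hp : "AWS".toList.isPrefixOf (c :: t) = true) :
    ∃ rest, c = 'A' ∧ t = 'W' :: 'S' :: rest := by
  rw [List.isPrefixOf_iff_prefix] at hp
  obtain ⟨rest, hr⟩ := hp
  simp at hr
  obtain ⟨h1, h2⟩ := hr
  cases t with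
  | nil => simp at h2
  | cons w t' =>
    cases t' with
    | nil => simp at h2
    | cons s t'' =>
      simp at h2
      exact ⟨t'', h1.symm, by simp [h2.1.symm, h2.2.1.symm]⟩

theorem pvRepl_length_lt : ∀ (l : List Char), "AWS".toList <:+: l →
    (pvRepl l).length < l.length := by
  intro l
  induction l using pvRepl.induct with
  | case1 => intro h; simp at h
  | case2 c t hp _ =>
    intro _
    rw [pvRepl, if_pos hp]
    obtain ⟨rest, hc, ht⟩ := pvPrefix_shape hp
    subst ht
    have := pvRepl_length_le (('W' :: 'S' :: rest).drop 2)
    simp at this ⊢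
    omega
  | case3 c t hp ih =>
    intro h
    rw [pvRepl, if_neg hp]
    rcases List.infix_cons_iff.mp h with hpre | hinf
    · exact absurd (List.isPrefixOf_iff_prefix.mpr hpre) hp
    · simpa using ih hinf

theorem pvReplace_length_lt (cs : List Char)
    (h : PySem.Chars.isIn "AWS".toList cs = true) :
    (PySem.Chars.replace cs "AWS".toList []).length < cs.length := by
  rw [pvReplace_eq_repl]
  exact pvRepl_length_lt cs ((PySem.Chars.isIn_iff_infix _ _).mp h)

-- B's while-loop: keep deleting all "AWS" occurrences until none remain.
def pvReduceB (cs : List Char) : List Char :=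
  if h : PySem.Chars.isIn "AWS".toList cs = true then
    pvReduceB (PySem.Chars.replace cs "AWS".toList [])
  else cs
termination_by cs.length
decreasing_by exact pvReplace_length_lt cs h

def getFinalString_alt (s : String) : String :=
  let t := pvReduceB s.toList
  if t = [] then "-1" else String.ofList t

-- ===== PRECONDITION & SPEC =====
def Spec_getFinalString (s : String) (out : String) : Prop := out = getFinalString_alt s
instance (s : String) (out : String) : Decidable (Spec_getFinalString s out) := by unfold Spec_getFinalString; infer_instance

-- ===== CLAIM (what is proved, stated in full; the proofs are below) =====
def Claim_equal_getFinalString : Prop := ∀ (s : String), Dom_getFinalString s → Spec_getFinalString s (getFinalString s)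

-- ===== LEMMAS AND PROOFS =====

theorem pvSlice_from_neg3 (l : List Char) :
    PySem.List.slice l (some (-3)) none = l.drop (l.length - 3) := by
  simp only [PySem.List.slice, PySem.List.clampIdx, if_pos (show (-3:Int) < 0 by norm_num)]
  rcases Nat.lt_or_ge l.length 3 with h | h
  · have h0 : ((l.length : Int) + (-3) < 0) := by omega
    have h1 : l.length - 3 = 0 := by omega
    simp [h0, h1]
  · have h0 : ¬ ((l.length : Int) + (-3) < 0) := by omega
    have h1 : ((l.length : Int) + (-3)).toNat = l.length - 3 := by omega
    have h2 : l.length - (l.length - 3) = 3 := by omega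
    simp only [if_neg h0, h1, h2]
    exact List.take_of_length_le (by simp; omega)

theorem pvSlice_to_neg3 (l : List Char) :
    PySem.List.slice l none (some (-3)) = l.take (l.length - 3) := by
  simp only [PySem.List.slice, PySem.List.clampIdx, if_pos (show (-3:Int) < 0 by norm_num)]
  rcases Nat.lt_or_ge l.length 3 with h | h
  · have h0 : ((l.length : Int) + (-3) < 0) := by omega
    have h1 : l.length - 3 = 0 := by omega
    simp [h0, h1]
  · have h0 : ¬ ((l.length : Int) + (-3) < 0) := by omega
    have h1 : ((l.length : Int) + (-3)).toNat = l.length - 3 := by omega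
    simp [h0, h1]

theorem pvSpell : PySem.List.pyGet? (['A','W','S'] : List Char) (-1) = some 'S' := by decide

theorem pvStepA_A (st : List Char) : pvStepA st 'A' = st ++ ['A'] := by
  simp [pvStepA, pvSpell]

theorem pvStepA_W (st : List Char) : pvStepA st 'W' = st ++ ['W'] := by
  simp [pvStepA, pvSpell]

theorem pvStepA_S (st : List Char) : pvStepA (st ++ ['A', 'W']) 'S' = st := by
  have ha : (st ++ ['A', 'W']) ++ ['S'] = st ++ ['A', 'W', 'S'] := by simp
  have hlen : (st ++ ['A', 'W', 'S']).length - 3 = st.length := by simp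
  simp only [pvStepA, ha, pvSlice_from_neg3, pvSlice_to_neg3, hlen,
    List.drop_left' rfl, List.take_left' rfl]
  simp [pvSpell]

-- Pushing 'A','W','S' onto any stack returns the stack unchanged.
theorem pvStep3 (st : List Char) :
    pvStepA (pvStepA (pvStepA st 'A') 'W') 'S' = st := by
  rw [pvStepA_A, pvStepA_W, show st ++ ['A'] ++ ['W'] = st ++ ['A','W'] by simp, pvStepA_S]

-- A's fold is invariant under one sweep of "AWS" deletions.
theorem pvFoldl_repl : ∀ (n : Nat) (cs : List Char), cs.length ≤ n → ∀ st,
    (pvRepl cs).foldl pvStepA st = cs.foldl pvStepA st := by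
  intro n
  induction n with
  | zero =>
    intro cs h st
    have : cs = [] := List.eq_nil_of_length_eq_zero (Nat.le_zero.mp h)
    subst this; rw [pvRepl]
  | succ n ih =>
    intro cs h st
    cases cs with
    | nil => rw [pvRepl]
    | cons c t =>
      by_cases hp : "AWS".toList.isPrefixOf (c :: t) = true
      · rw [pvRepl, if_pos hp]
        obtain ⟨rest, hc, ht⟩ := pvPrefix_shape hp
        subst hc; subst ht
        simp only [List.drop, List.foldl_cons]
        rw [ih rest (by simp at h; omega) st]
        rw [pvStep3]
      · rw [pvRepl, if_neg hp]
        simp only [List.foldl_cons]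
        exact ih t (by simp at h; omega) (pvStepA st c)

-- On a string with no "AWS" occurrence, A's fold just appends everything.
theorem pvFoldl_fix : ∀ (cs st : List Char), ¬ ("AWS".toList <:+: st ++ cs) →
    cs.foldl pvStepA st = st ++ cs := by
  intro cs
  induction cs with
  | nil => intro st _; simp
  | cons c t ih =>
    intro st h
    have hstep : pvStepA st c = st ++ [c] := by
      by_cases hc : ((some c == PySem.List.pyGet? ("AWS".toList) (-1)) &&
          ("AWS".toList == PySem.List.slice (st ++ [c]) (some (-3)) none)) = true
      · exfalso
        have h2 := (Bool.and_eq_true _ _).mp hc |>.2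
        have heq : "AWS".toList = PySem.List.slice (st ++ [c]) (some (-3)) none := by
          simpa using h2
        apply h
        rw [heq, pvSlice_from_neg3]
        have hsuf : ((st ++ [c]).drop ((st ++ [c]).length - 3)) <:+ (st ++ [c]) :=
          List.drop_suffix _ _
        have hpre : (st ++ [c]) <+: st ++ c :: t := ⟨t, by simp⟩
        exact hsuf.isInfix.trans hpre.isInfix
      · simp only [pvStepA]
        rw [if_neg hc]
    rw [List.foldl_cons, hstep, ih (st ++ [c]) (by simpa using h)]
    simp

theorem pvReduceB_foldl : ∀ (n : Nat) (cs : List Char), cs.length ≤ n → ∀ st,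
    (pvReduceB cs).foldl pvStepA st = cs.foldl pvStepA st := by
  intro n
  induction n with
  | zero =>
    intro cs h st
    have : cs = [] := List.eq_nil_of_length_eq_zero (Nat.le_zero.mp h)
    subst this
    rw [pvReduceB, dif_neg (by decide)]
  | succ n ih =>
    intro cs h st
    rw [pvReduceB]
    by_cases hin : PySem.Chars.isIn "AWS".toList cs = true
    · rw [dif_pos hin]
      have hlt := pvReplace_length_lt cs hin
      rw [ih _ (by omega) st, pvReplace_eq_repl]
      exact pvFoldl_repl cs.length cs (Nat.le_refl _) st
    · rw [dif_neg hin]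

theorem pvReduceB_noAWS : ∀ (n : Nat) (cs : List Char), cs.length ≤ n →
    ¬ ("AWS".toList <:+: pvReduceB cs) := by
  intro n
  induction n with
  | zero =>
    intro cs h
    have : cs = [] := List.eq_nil_of_length_eq_zero (Nat.le_zero.mp h)
    subst this
    rw [pvReduceB, dif_neg (by decide)]
    decide
  | succ n ih =>
    intro cs h
    rw [pvReduceB]
    by_cases hin : PySem.Chars.isIn "AWS".toList cs = true
    · rw [dif_pos hin]
      exact ih _ (by have := pvReplace_length_lt cs hin; omega)
    · rw [dif_neg hin]
      exact (PySem.Chars.isIn_eq_false_iff _ _).mp (Bool.not_eq_true _ ▸ Bool.of_not_eq_true hin)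

-- A's stack result IS B's fixpoint.
theorem pvMain (cs : List Char) : cs.foldl pvStepA [] = pvReduceB cs := by
  rw [← pvReduceB_foldl cs.length cs (Nat.le_refl _) []]
  rw [pvFoldl_fix (pvReduceB cs) [] (by simpa using pvReduceB_noAWS cs.length cs (Nat.le_refl _))]
  simp

-- ===== VERDICT (by name: the statement is the Claim_ definition above) =====
theorem getFinalString_spec : Claim_equal_getFinalString := by
  intro s _
  unfold Spec_getFinalString getFinalString getFinalString_alt
  rw [pvMain s.toList]
  cases h : pvReduceB s.toList with
  | nil => simp
  | cons c t => simp
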